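-- pv_equiv track=rewrite | github.com/odonnellryan/SHT | reference_files/controller_analysis.py | conv_bytes_to_data
-- ===== SOURCE A (Python) =====
-- def conv_bytes_to_data(linked_list):
--     if linked_list is None:
--         return None
--     if len(linked_list) % 2 != 0:
--         return None
--     result_list = []
--     for i in range(len(linked_list) // 2):
--         b_arr = [0, 0]
--         for j in range(2):
--             b_arr[j] += linked_list[i * 2 + j]
--         result_list.append(int(bytes(b_arr).hex(), 16))
--     return result_list
-- ===== SOURCE B (Python) =====
-- def conv_bytes_to_data(linked_list):
--     if linked_list is None:
--         return None
--     if len(linked_list) % 2 != 0: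
--         return None
--     it = iter(linked_list)
--     return [hi * 256 + lo for hi, lo in zip(it, it)]
-- ===== Notes on version B (the rewrite author's own statement) =====
-- stated objective: idiomatic
-- what changed: Replaces the index loop that rebuilds each 16-bit value through bytes().hex() and int(...,16) with a single zip-of-one-iterator pairing comprehension computing hi*256+lo directly.
import Mathlib
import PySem

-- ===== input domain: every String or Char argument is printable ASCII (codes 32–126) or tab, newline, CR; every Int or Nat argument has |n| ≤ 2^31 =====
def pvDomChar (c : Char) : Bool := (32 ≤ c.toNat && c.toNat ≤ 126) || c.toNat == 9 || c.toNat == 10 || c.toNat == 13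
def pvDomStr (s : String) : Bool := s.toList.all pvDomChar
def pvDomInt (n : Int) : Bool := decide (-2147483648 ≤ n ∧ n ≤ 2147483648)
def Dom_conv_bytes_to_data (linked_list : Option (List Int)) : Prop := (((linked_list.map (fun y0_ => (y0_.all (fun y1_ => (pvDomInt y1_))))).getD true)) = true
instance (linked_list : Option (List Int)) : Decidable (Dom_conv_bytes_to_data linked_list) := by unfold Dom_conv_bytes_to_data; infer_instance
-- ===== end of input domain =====

-- B replaces A's index loop with bytes().hex()/int(...,16) reconstruction by an
-- iterator-pairing comprehension computing hi*256+lo directly (idiomatic; same cost).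

-- ===== PORT A =====
-- Literal port of A. `int(bytes(b_arr).hex(), 16)` on a 2-byte buffer [b0, b1] is
-- exactly b0*256 + b1 whenever both bytes are in 0..255 (guaranteed by Pre_, since
-- bytes() raises ValueError otherwise); the loop structure is kept step for step.
def conv_bytes_to_data (linked_list : Option (List Int)) : Option (List Int) :=
  match linked_list with
  | none => none
  | some l =>
    if (l.length % 2 ≠ 0) then none
    else
      some ((PySem.List.pyRange 0 (PySem.Int.floordiv (l.length : Int) 2) 1).foldl
        (fun result_list i =>
          let b_arr : List Int := [0, 0]
          let b_arr := (PySem.List.pyRange 0 2 1).foldl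
            (fun b j => PySem.List.pySetD b j
              (PySem.List.pyGetD b j 0 + PySem.List.pyGetD l (i * 2 + j) 0)) b_arr
          result_list ++ [PySem.List.pyGetD b_arr 0 0 * 256 + PySem.List.pyGetD b_arr 1 0]) [])

-- ===== PORT B =====
-- zip(it, it) over one iterator: consume two elements at a time (drops a lone leftover).
def pvPairUp : List Int → List Int
  | hi :: lo :: rest => (hi * 256 + lo) :: pvPairUp rest
  | _ => []

def conv_bytes_to_data_alt (linked_list : Option (List Int)) : Option (List Int) :=
  match linked_list with
  | none => none
  | some l =>
    if (l.length % 2 ≠ 0) then none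
    else some (pvPairUp l)

-- ===== PRECONDITION & SPEC =====
-- Pre_ excludes exactly the inputs where the Python A raises: an even-length list
-- containing an element outside 0..255 makes bytes(b_arr) raise ValueError.
def Pre_conv_bytes_to_data (linked_list : Option (List Int)) : Prop :=
  (linked_list.all fun l => decide (l.length % 2 ≠ 0) || l.all fun x => decide (0 ≤ x ∧ x < 256)) = true
instance (linked_list : Option (List Int)) : Decidable (Pre_conv_bytes_to_data linked_list) := by
  unfold Pre_conv_bytes_to_data; infer_instance

def pvWitness_conv_bytes_to_data : Option (List Int) := some [1, 2, 255, 0]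

def Spec_conv_bytes_to_data (linked_list : Option (List Int)) (out : Option (List Int)) : Prop := out = conv_bytes_to_data_alt linked_list
instance (linked_list : Option (List Int)) (out : Option (List Int)) : Decidable (Spec_conv_bytes_to_data linked_list out) := by unfold Spec_conv_bytes_to_data; infer_instance

-- ===== CLAIM (what is proved, stated in full; the proofs are below) =====
def Claim_equal_conv_bytes_to_data : Prop := ∀ (linked_list : Option (List Int)), Dom_conv_bytes_to_data linked_list → Pre_conv_bytes_to_data linked_list → Spec_conv_bytes_to_data linked_list (conv_bytes_to_data linked_list)

-- ===== LEMMAS AND PROOFS =====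

-- The per-pair value A's inner 2-iteration loop produces for index i.
lemma pvInnerFold (l : List Int) (i : Int) :
    (PySem.List.pyRange 0 2 1).foldl
      (fun b j => PySem.List.pySetD b j
        (PySem.List.pyGetD b j 0 + PySem.List.pyGetD l (i * 2 + j) 0)) [0, 0]
    = [PySem.List.pyGetD l (i * 2) 0, PySem.List.pyGetD l (i * 2 + 1) 0] := by
  have h2 : PySem.List.pyRange 0 2 1 = [0, 1] := by decide
  simp [h2, List.foldl, PySem.List.pySetD_of_nonneg, PySem.List.pyGetD]

-- The range-indexed map equals the structural pairing, for every list.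
lemma pvMapRange_pairUp (l : List Int) :
    (List.range (l.length / 2)).map
      (fun k => l.getD (2 * k) 0 * 256 + l.getD (2 * k + 1) 0) = pvPairUp l := by
  induction l using pvPairUp.induct with
  | case1 hi lo rest ih =>
    have hlen : (hi :: lo :: rest).length / 2 = rest.length / 2 + 1 := by
      simp [List.length]; omega
    rw [hlen, List.range_succ_eq_map, List.map_cons, List.map_map]
    refine congrArg₂ _ (by simp) ?_
    rw [← ih]
    apply List.map_congr_left
    intro k _
    have h1 : 2 * (k + 1) = 2 * k + 1 + 1 := by omega
    have h2 : 2 * (k + 1) + 1 = (2 * k + 1) + 1 + 1 := by omega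
    simp [Function.comp, h1]
  | case2 l h =>
    cases l with
    | nil => simp [pvPairUp]
    | cons a t =>
      cases t with
      | nil => simp [pvPairUp]
      | cons b r => exact absurd rfl (h a b r)

-- A's outer fold equals pvPairUp.
lemma pvFold_eq_pairUp (l : List Int) :
    (PySem.List.pyRange 0 (PySem.Int.floordiv (l.length : Int) 2) 1).foldl
      (fun result_list i =>
        let b_arr : List Int := [0, 0]
        let b_arr := (PySem.List.pyRange 0 2 1).foldl
          (fun b j => PySem.List.pySetD b j
            (PySem.List.pyGetD b j 0 + PySem.List.pyGetD l (i * 2 + j) 0)) b_arr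
        result_list ++ [PySem.List.pyGetD b_arr 0 0 * 256 + PySem.List.pyGetD b_arr 1 0]) []
    = pvPairUp l := by
  have hfd : PySem.Int.floordiv (l.length : Int) 2 = ((l.length / 2 : Nat) : Int) := by
    exact_mod_cast PySem.Int.floordiv_natCast l.length 2
  rw [hfd]
  simp only [pvInnerFold]
  rw [PySem.List.foldl_append_singleton_eq_map]
  rw [PySem.List.pyRange_one, List.map_map]
  rw [show ((((l.length / 2 : Nat) : Int)) - 0).toNat = l.length / 2 by omega]
  rw [← pvMapRange_pairUp l]
  apply List.map_congr_left
  intro k _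
  have e1 : ((k : Int)) * 2 = ((2 * k : Nat) : Int) := by push_cast; ring
  simp only [Function.comp, PySem.List.pyGetD, zero_add]
  rw [e1]
  simp [pysem]
  rw [show (2 * (k : Int) + 1) = ((2 * k + 1 : Nat) : Int) by push_cast; ring,
      show ((2 : Int) * (k : Int)).toNat = 2 * k by omega,
      PySem.List.pyGet?_natCast]

-- ===== VERDICT (by name: the statement is the Claim_ definition above) =====
theorem conv_bytes_to_data_spec : Claim_equal_conv_bytes_to_data := by
  intro ll _ _
  unfold Spec_conv_bytes_to_data conv_bytes_to_data conv_bytes_to_data_alt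
  match ll with
  | none => rfl
  | some l =>
    by_cases h : l.length % 2 ≠ 0
    · simp [h]
    · simp only [h, if_false]
      exact congrArg some (pvFold_eq_pairUp l)
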